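-- pv_equiv track=rewrite | github.com/mkrtmkm/Repo | Audit projects/Audit07/mokrytskyi_7.05.py | convert_to_dec
-- ===== SOURCE A (Python) =====
-- def convert_to_dec(n, k=10):
--     pow_k = 1
--     converted = 0
--     while n > 0:
--         last = n % 10
--         converted += last * pow_k
--         pow_k *= k
--         n = n // 10
--     return converted
-- ===== SOURCE B (Python) =====
-- def convert_to_dec(n, k=10):
--     # Horner over the decimal string of n, most-significant digit first
--     if n <= 0:
--         return 0
--     result = 0
--     for ch in str(n):
--         result = result * k + int(ch)
--     return result
-- ===== Notes on version B (the rewrite author's own statement) =====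
-- stated objective: idiomatic
-- what changed: Replaced the least-significant-first arithmetic loop maintaining a running power-of-k accumulator with a Horner-style fold over the decimal string str(n), most-significant digit first, with no power variable and no division/modulo loop.
import Mathlib
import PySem

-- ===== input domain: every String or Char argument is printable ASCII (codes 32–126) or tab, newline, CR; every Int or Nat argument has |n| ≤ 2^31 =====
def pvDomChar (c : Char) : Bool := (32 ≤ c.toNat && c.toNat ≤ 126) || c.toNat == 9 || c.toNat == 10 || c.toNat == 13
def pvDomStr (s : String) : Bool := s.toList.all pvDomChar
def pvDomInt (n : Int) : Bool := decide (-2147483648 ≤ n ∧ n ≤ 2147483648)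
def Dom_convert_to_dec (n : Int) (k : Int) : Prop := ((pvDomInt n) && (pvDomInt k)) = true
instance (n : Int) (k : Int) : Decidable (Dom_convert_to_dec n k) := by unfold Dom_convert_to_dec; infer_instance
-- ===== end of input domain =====

-- B replaces A's least-significant-first power-accumulator arithmetic loop with a
-- Horner-style fold over the decimal string str(n) (objective: idiomatic).

-- ===== PORT A =====
-- A's while loop; fuel = n.toNat only makes the recursion total (the loop runs at
-- most n.toNat times), it changes no computed value.
def convertLoopA : Nat → Int → Int → Int → Int → Int
  | 0, _, _, _, converted => converted
  | fuel + 1, n, k, pow_k, converted =>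
    if n > 0 then
      convertLoopA fuel (PySem.Int.floordiv n 10) k (pow_k * k)
        (converted + PySem.Int.mod n 10 * pow_k)
    else converted

def convert_to_dec (n : Int) (k : Int) : Int := convertLoopA n.toNat n k 1 0

-- ===== PORT B =====
-- Source B verbatim: guard, then 'for ch in str(n): result = result*k + int(ch)'.
-- int(ch) is ported as the char code minus 48; this is exact here because str(n)
-- of a positive int consists only of the digit characters '0'..'9'.
def convert_to_dec_alt (n : Int) (k : Int) : Int :=
  if n ≤ 0 then 0
  else (PySem.Int.toStr n).toList.foldl (fun result ch => result * k + ((ch.toNat : Int) - 48)) 0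

-- ===== PRECONDITION & SPEC =====
def Spec_convert_to_dec (n : Int) (k : Int) (out : Int) : Prop := out = convert_to_dec_alt n k
instance (n : Int) (k : Int) (out : Int) : Decidable (Spec_convert_to_dec n k out) := by unfold Spec_convert_to_dec; infer_instance

-- ===== CLAIM (what is proved, stated in full; the proofs are below) =====
def Claim_equal_convert_to_dec : Prop := ∀ (n : Int) (k : Int), Dom_convert_to_dec n k → Spec_convert_to_dec n k (convert_to_dec n k)

-- ===== LEMMAS AND PROOFS =====

-- the mathematical value both programs compute: digits of m reinterpreted in base k
def pvDigitsVal (k : Int) (m : Nat) : Int :=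
  if m = 0 then 0 else pvDigitsVal k (m / 10) * k + (m % 10 : Nat)
decreasing_by exact Nat.div_lt_self (Nat.pos_of_ne_zero (by assumption)) (by norm_num)

theorem pvDigitsVal_zero (k : Int) : pvDigitsVal k 0 = 0 := by
  rw [pvDigitsVal]; simp

theorem pvDigitsVal_pos (k : Int) (m : Nat) (h : m ≠ 0) :
    pvDigitsVal k m = pvDigitsVal k (m / 10) * k + (m % 10 : Nat) := by
  rw [pvDigitsVal]; simp [h]

-- A-side: the loop computes converted + pow_k * pvDigitsVal
theorem loopA_eq (fuel : Nat) :
    ∀ (n k p c : Int), n.toNat ≤ fuel →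
      convertLoopA fuel n k p c = c + p * pvDigitsVal k n.toNat := by
  induction fuel with
  | zero =>
    intro n k p c hle
    have h0 : n.toNat = 0 := by omega
    rw [convertLoopA, h0, pvDigitsVal_zero]
    ring
  | succ fuel ih =>
    intro n k p c hle
    by_cases h : n > 0
    · have hfd : PySem.Int.floordiv n 10 = n / 10 :=
        PySem.Int.floordiv_eq_ediv_of_pos (by norm_num)
      have hmod : PySem.Int.mod n 10 = n % 10 :=
        PySem.Int.mod_eq_emod_of_pos (by norm_num)
      have htn : (n / 10).toNat = n.toNat / 10 := by omega
      have hlt : (n / 10).toNat ≤ fuel := by omega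
      rw [convertLoopA]
      simp only [if_pos h]
      rw [ih (PySem.Int.floordiv n 10) k (p * k) (c + PySem.Int.mod n 10 * p)
            (by rw [hfd]; omega)]
      rw [hfd, hmod, htn, pvDigitsVal_pos k n.toNat (by omega)]
      have hm : ((n.toNat % 10 : Nat) : Int) = n % 10 := by omega
      rw [hm]; ring
    · rw [convertLoopA]
      simp only [if_neg h]
      have h0 : n.toNat = 0 := by omega
      rw [h0, pvDigitsVal_zero]
      ring

-- digit characters: ((Nat.digitChar d).toNat : Int) - 48 = d  for d < 10
theorem digitChar_val (d : Nat) (h : d < 10) :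
    ((Nat.digitChar d).toNat : Int) - 48 = d := by
  interval_cases d <;> decide

-- toDigitsCore pulls its accumulator out as an append
theorem toDigitsCore_append (fuel : Nat) :
    ∀ (n : Nat) (ds : List Char),
      Nat.toDigitsCore 10 fuel n ds = Nat.toDigitsCore 10 fuel n [] ++ ds := by
  induction fuel with
  | zero => intro n ds; simp [Nat.toDigitsCore]
  | succ fuel ih =>
    intro n ds
    rw [Nat.toDigitsCore, Nat.toDigitsCore]
    by_cases h : n / 10 = 0
    · simp [h]
    · simp only [if_neg h]
      rw [ih (n / 10) ((n % 10).digitChar :: ds), ih (n / 10) [(n % 10).digitChar]]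
      simp

-- Horner fold over the digit characters of m computes pvDigitsVal
theorem fold_toDigitsCore (k : Int) (m : Nat) :
    ∀ (fuel : Nat), 0 < fuel → m < 10 ^ fuel → 0 < m →
      List.foldl (fun result ch => result * k + ((ch.toNat : Int) - 48)) 0
        (Nat.toDigitsCore 10 fuel m []) = pvDigitsVal k m := by
  induction m using Nat.strong_induction_on with
  | _ m ihm =>
    intro fuel hf hlt hm
    obtain ⟨f, rfl⟩ : ∃ f, fuel = f + 1 := ⟨fuel - 1, by omega⟩
    rw [Nat.toDigitsCore]
    by_cases h : m / 10 = 0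
    · simp only [if_pos h]
      have h10 : m < 10 := by omega
      simp only [List.foldl_cons, List.foldl_nil]
      rw [digitChar_val (m % 10) (by omega), pvDigitsVal_pos k m (by omega), h,
        pvDigitsVal_zero]
    · simp only [if_neg h]
      rw [toDigitsCore_append f (m / 10) [(m % 10).digitChar]]
      have hdivlt : m / 10 < 10 ^ f := by
        have : m < 10 * 10 ^ f := by
          calc m < 10 ^ (f + 1) := hlt
          _ = 10 * 10 ^ f := by ring
        omega
      have hfpos : 0 < f := by
        rcases Nat.eq_zero_or_pos f with h0 | h0
        · exfalso; rw [h0] at hdivlt; simp at hdivlt; omega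
        · exact h0
      rw [List.foldl_append]
      rw [ihm (m / 10) (by omega) f hfpos hdivlt (by omega)]
      simp only [List.foldl_cons, List.foldl_nil]
      rw [digitChar_val (m % 10) (by omega), pvDigitsVal_pos k m (by omega)]

-- B-side: the alt port equals pvDigitsVal
theorem alt_eq (n k : Int) : convert_to_dec_alt n k = pvDigitsVal k n.toNat := by
  unfold convert_to_dec_alt
  by_cases h : n ≤ 0
  · have : n.toNat = 0 := by omega
    rw [if_pos h, this, pvDigitsVal_zero]
  · rw [if_neg h]
    rw [PySem.Int.toList_toStr]
    unfold PySem.Int.toChars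
    rw [if_neg (by omega : ¬ n < 0)]
    unfold Nat.toDigits
    have hm : 0 < n.toNat := by omega
    have hpow : n.toNat < 10 ^ (n.toNat + 1) := by
      calc n.toNat < 10 ^ n.toNat := Nat.lt_pow_self (by norm_num)
      _ ≤ 10 ^ (n.toNat + 1) := Nat.pow_le_pow_right (by norm_num) (by omega)
    exact fold_toDigitsCore k n.toNat (n.toNat + 1) (by omega) hpow hm

-- ===== VERDICT (by name: the statement is the Claim_ definition above) =====
theorem convert_to_dec_spec : Claim_equal_convert_to_dec := by
  intro n k _
  unfold Spec_convert_to_dec convert_to_dec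
  rw [loopA_eq n.toNat n k 1 0 le_rfl, alt_eq]
  ring
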